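-- pv_equiv track=rewrite | github.com/gabrielecastellano/dragon | dragon_agent/agreement/sdo_agreement.py | _compare_bid_times
-- ===== SOURCE A (Python) =====
-- def _compare_bid_times(node_bidding_data_1, node_bidding_data_2, sdo=None):
--     """
--
--     :param node_bidding_data_1:
--     :param node_bidding_data_2:
--     :param sdo: if given, compare times just for it
--     :type node_bidding_data_1: dict[str, dict[str, int]]
--     :type node_bidding_data_2: dict[str, dict[str, int]]
--     :return: 1 if first has at least a newer time, 0 if all are equal, -1 otherwise
--     """
--     equal_flag = True
--     for sdo_i in node_bidding_data_1:
--         if sdo is not None and sdo_i != sdo: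
--             continue
--         if node_bidding_data_1[sdo_i]['timestamp'] > node_bidding_data_2[sdo_i]['timestamp']:
--             return 1
--         elif node_bidding_data_1[sdo_i]['timestamp'] < node_bidding_data_2[sdo_i]['timestamp']:
--             equal_flag = False
--     if equal_flag:
--         return 0
--     else:
--         return -1
-- ===== SOURCE B (Python) =====
-- def _compare_bid_times(node_bidding_data_1, node_bidding_data_2, sdo=None):
--     keys = [k for k in node_bidding_data_1 if sdo is None or k == sdo]
--     if any(node_bidding_data_1[k]['timestamp'] > node_bidding_data_2[k]['timestamp'] for k in keys):
--         return 1
--     if any(node_bidding_data_1[k]['timestamp'] < node_bidding_data_2[k]['timestamp'] for k in keys):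
--         return -1
--     return 0
-- ===== Notes on version B (the rewrite author's own statement) =====
-- stated objective: simpler
-- what changed: Replaces the single flag-tracking loop with early return by a filtered key list and two sequential short-circuiting any() scans (first for a newer, then for an older timestamp).
import Mathlib
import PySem

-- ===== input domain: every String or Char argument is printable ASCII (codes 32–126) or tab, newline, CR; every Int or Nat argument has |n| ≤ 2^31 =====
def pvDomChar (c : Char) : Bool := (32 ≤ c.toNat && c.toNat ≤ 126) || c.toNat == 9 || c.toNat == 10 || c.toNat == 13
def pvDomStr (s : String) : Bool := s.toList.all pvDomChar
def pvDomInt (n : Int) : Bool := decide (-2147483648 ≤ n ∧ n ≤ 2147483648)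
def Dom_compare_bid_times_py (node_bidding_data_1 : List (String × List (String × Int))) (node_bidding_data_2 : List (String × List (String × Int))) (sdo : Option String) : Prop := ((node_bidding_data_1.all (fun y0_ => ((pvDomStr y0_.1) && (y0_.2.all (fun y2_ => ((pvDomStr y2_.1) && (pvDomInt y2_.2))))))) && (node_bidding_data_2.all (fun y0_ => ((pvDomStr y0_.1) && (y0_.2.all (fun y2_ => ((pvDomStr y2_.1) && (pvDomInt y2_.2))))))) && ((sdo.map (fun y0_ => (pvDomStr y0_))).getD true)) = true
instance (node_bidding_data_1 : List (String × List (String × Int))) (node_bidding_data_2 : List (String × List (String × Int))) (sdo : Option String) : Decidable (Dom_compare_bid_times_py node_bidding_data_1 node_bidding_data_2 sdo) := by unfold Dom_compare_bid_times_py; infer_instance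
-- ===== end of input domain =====

-- B replaces A's flag-tracking loop by a filtered key list and two short-circuiting any-scans; objective: simpler.
-- ===== PORT A =====
-- d[k]['timestamp'] for both Pythons: first-match association lookup; none = KeyError
def pvLook (d : List (String × List (String × Int))) (k : String) : Option Int :=
  match List.lookup k d with
  | some inner => List.lookup "timestamp" inner
  | none => none

-- A's `sdo is not None and sdo_i != sdo`
def pvSkip (sdo : Option String) (k : String) : Bool :=
  match sdo with
  | none => false
  | some s => k != s

-- A's for-loop with the equal_flag accumulator; none = KeyError propagated
def pvALoop (d1 d2 : List (String × List (String × Int))) (sdo : Option String) :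
    List (String × List (String × Int)) → Bool → Option Int
  | [], eq => some (if eq then 0 else -1)
  | (k, _) :: rest, eq =>
    if pvSkip sdo k then pvALoop d1 d2 sdo rest eq
    else
      match pvLook d1 k, pvLook d2 k with
      | some t1, some t2 =>
        if t2 < t1 then some 1
        else if t1 < t2 then pvALoop d1 d2 sdo rest false
        else pvALoop d1 d2 sdo rest eq
      | _, _ => none

def compare_bid_times_py (node_bidding_data_1 : List (String × List (String × Int))) (node_bidding_data_2 : List (String × List (String × Int))) (sdo : Option String) : Int :=
  match pvALoop node_bidding_data_1 node_bidding_data_2 sdo node_bidding_data_1 true with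
  | some r => r
  | none => 0  -- unreachable under Pre_ (A raises KeyError there)

-- ===== PORT B =====
-- B's `sdo is None or k == sdo`
def pvBKeep (sdo : Option String) (k : String) : Bool :=
  match sdo with
  | none => true
  | some s => k == s

-- B's short-circuiting any(cmp(d1[k]['timestamp'], d2[k]['timestamp']) for k in keys); none = KeyError
def pvAnyCmp (d1 d2 : List (String × List (String × Int))) (cmp : Int → Int → Bool) :
    List String → Option Bool
  | [] => some false
  | k :: rest =>
    match pvLook d1 k, pvLook d2 k with
    | some t1, some t2 => if cmp t1 t2 then some true else pvAnyCmp d1 d2 cmp rest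
    | _, _ => none

def compare_bid_times_py_alt (node_bidding_data_1 : List (String × List (String × Int))) (node_bidding_data_2 : List (String × List (String × Int))) (sdo : Option String) : Int :=
  let keys := (node_bidding_data_1.map Prod.fst).filter (pvBKeep sdo)
  match pvAnyCmp node_bidding_data_1 node_bidding_data_2 (fun a b => b < a) keys with
  | some true => 1
  | some false =>
    match pvAnyCmp node_bidding_data_1 node_bidding_data_2 (fun a b => a < b) keys with
    | some true => -1
    | _ => 0
  | none => 0  -- unreachable under Pre_ (B raises KeyError there, exactly where A does)

-- ===== PRECONDITION & SPEC =====
-- both lookups d1[k]['timestamp'], d2[k]['timestamp'] succeed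
def pvOk (d1 d2 : List (String × List (String × Int))) (k : String) : Bool :=
  (pvLook d1 k).isSome && (pvLook d2 k).isSome
-- d1's timestamp is strictly newer at k (meaningful only when pvOk holds)
def pvGtAt (d1 d2 : List (String × List (String × Int))) (k : String) : Bool :=
  decide ((pvLook d2 k).getD 0 < (pvLook d1 k).getD 0)

-- Pre_ excludes exactly the inputs on which A raises KeyError: the loop reaches a compared key
-- (every earlier kept key resolvable with no strictly-newer timestamp, so no earlier return)
-- whose d2 entry or 'timestamp' field is missing.  Pre_ is exactly A's non-raising set.
def Pre_compare_bid_times_py (node_bidding_data_1 : List (String × List (String × Int))) (node_bidding_data_2 : List (String × List (String × Int))) (sdo : Option String) : Prop :=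
  ∀ j : Nat, (h : j < ((node_bidding_data_1.map Prod.fst).filter (pvBKeep sdo)).length) →
    ((((node_bidding_data_1.map Prod.fst).filter (pvBKeep sdo)).take j).all
      (fun k => pvOk node_bidding_data_1 node_bidding_data_2 k && !pvGtAt node_bidding_data_1 node_bidding_data_2 k) = true) →
    pvOk node_bidding_data_1 node_bidding_data_2 (((node_bidding_data_1.map Prod.fst).filter (pvBKeep sdo))[j]) = true
instance (node_bidding_data_1 : List (String × List (String × Int))) (node_bidding_data_2 : List (String × List (String × Int))) (sdo : Option String) : Decidable (Pre_compare_bid_times_py node_bidding_data_1 node_bidding_data_2 sdo) := by unfold Pre_compare_bid_times_py; infer_instance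

def pvWitness_compare_bid_times_py : (List (String × List (String × Int))) × (List (String × List (String × Int))) × Option String :=
  ([("a", [("timestamp", 3)]), ("b", [("timestamp", 1)])],
   [("a", [("timestamp", 3)]), ("b", [("timestamp", 2)])], none)

def Spec_compare_bid_times_py (node_bidding_data_1 : List (String × List (String × Int))) (node_bidding_data_2 : List (String × List (String × Int))) (sdo : Option String) (out : Int) : Prop := out = compare_bid_times_py_alt node_bidding_data_1 node_bidding_data_2 sdo
instance (node_bidding_data_1 : List (String × List (String × Int))) (node_bidding_data_2 : List (String × List (String × Int))) (sdo : Option String) (out : Int) : Decidable (Spec_compare_bid_times_py node_bidding_data_1 node_bidding_data_2 sdo out) := by unfold Spec_compare_bid_times_py; infer_instance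

-- ===== CLAIM =====
def Claim_equal_compare_bid_times_py : Prop := ∀ (node_bidding_data_1 : List (String × List (String × Int))) (node_bidding_data_2 : List (String × List (String × Int))) (sdo : Option String), Dom_compare_bid_times_py node_bidding_data_1 node_bidding_data_2 sdo → Pre_compare_bid_times_py node_bidding_data_1 node_bidding_data_2 sdo → Spec_compare_bid_times_py node_bidding_data_1 node_bidding_data_2 sdo (compare_bid_times_py node_bidding_data_1 node_bidding_data_2 sdo)

-- ===== LEMMAS AND PROOFS =====
-- proof-only abbreviation of A's loop restricted to the kept-key list
def pvAK (d1 d2 : List (String × List (String × Int))) : List String → Bool → Option Int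
  | [], eq => some (if eq then 0 else -1)
  | k :: rest, eq =>
    match pvLook d1 k, pvLook d2 k with
    | some t1, some t2 =>
      if t2 < t1 then some 1
      else if t1 < t2 then pvAK d1 d2 rest false
      else pvAK d1 d2 rest eq
    | _, _ => none

lemma pvSkip_eq_not_keep (sdo : Option String) (k : String) : pvSkip sdo k = !pvBKeep sdo k := by
  cases sdo <;> simp [pvSkip, pvBKeep, bne]

lemma pvALoop_eq_pvAK (d1 d2 : List (String × List (String × Int))) (sdo : Option String)
    (l : List (String × List (String × Int))) (eq : Bool) :
    pvALoop d1 d2 sdo l eq = pvAK d1 d2 ((l.map Prod.fst).filter (pvBKeep sdo)) eq := by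
  induction l generalizing eq with
  | nil => simp [pvALoop, pvAK]
  | cons p rest ih =>
    obtain ⟨k, v⟩ := p
    by_cases hk : pvBKeep sdo k = true
    · simp only [pvALoop, pvSkip_eq_not_keep, hk, Bool.not_true, Bool.false_eq_true, if_false,
        List.map_cons, List.filter_cons_of_pos hk, pvAK]
      cases pvLook d1 k <;> cases pvLook d2 k <;> simp [ih]
    · rw [Bool.not_eq_true] at hk
      have hf : List.filter (pvBKeep sdo) (k :: rest.map Prod.fst) =
          List.filter (pvBKeep sdo) (rest.map Prod.fst) := by
        simp [hk]
      simp only [pvALoop, pvSkip_eq_not_keep, hk, Bool.not_false, if_true, List.map_cons, hf]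
      exact ih eq

-- A's kept-key loop in terms of B's two scans (unconditional; `none` = KeyError aligns)
lemma pvAK_main (d1 d2 : List (String × List (String × Int))) (K : List String) (eq : Bool) :
    pvAK d1 d2 K eq =
      match pvAnyCmp d1 d2 (fun a b => b < a) K with
      | some true => some 1
      | some false =>
          some (if eq && !(K.any (fun k => decide ((pvLook d1 k).getD 0 < (pvLook d2 k).getD 0)))
                then 0 else -1)
      | none => none := by
  induction K generalizing eq with
  | nil => simp [pvAK, pvAnyCmp]
  | cons k rest ih =>
    simp only [pvAK, pvAnyCmp]
    cases h1 : pvLook d1 k with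
    | none => rfl
    | some t1 =>
      cases h2 : pvLook d2 k with
      | none => rfl
      | some t2 =>
        by_cases hgt : t2 < t1
        · simp [hgt]
        · simp only [hgt, decide_false, Bool.false_eq_true, if_false]
          by_cases hlt : t1 < t2
          · rw [if_pos hlt, ih false]
            cases hs : pvAnyCmp d1 d2 (fun a b => b < a) rest with
            | none => rfl
            | some b =>
              cases b <;> simp [h1, h2, hlt]
          · rw [if_neg hlt, ih eq]
            cases hs : pvAnyCmp d1 d2 (fun a b => b < a) rest with
            | none => rfl
            | some b =>
              cases b <;> simp [h1, h2, hlt]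

-- a completed scan (some false) visited every key, so every lookup succeeded
lemma pvAnyCmp_false_allOk (d1 d2 : List (String × List (String × Int)))
    (cmp : Int → Int → Bool) (K : List String)
    (h : pvAnyCmp d1 d2 cmp K = some false) :
    ∀ k ∈ K, (pvLook d1 k).isSome ∧ (pvLook d2 k).isSome := by
  induction K with
  | nil => intro k hk; cases hk
  | cons k rest ih =>
    intro x hx
    simp only [pvAnyCmp] at h
    cases h1 : pvLook d1 k with
    | none => rw [h1] at h; cases h2 : pvLook d2 k <;> simp at h
    | some t1 =>
      cases h2 : pvLook d2 k with
      | none => rw [h1, h2] at h; simp at h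
      | some t2 =>
        rw [h1, h2] at h
        by_cases hc : cmp t1 t2 = true
        · simp [hc] at h
        · rw [Bool.not_eq_true] at hc
          simp only [hc, Bool.false_eq_true, if_false] at h
          rcases List.mem_cons.mp hx with rfl | hx'
          · exact ⟨by simp [h1], by simp [h2]⟩
          · exact ih h x hx'

-- B's short-circuiting any over fully resolvable keys
lemma pvAnyCmp_spec (d1 d2 : List (String × List (String × Int))) (cmp : Int → Int → Bool)
    (K : List String)
    (h : ∀ k ∈ K, (pvLook d1 k).isSome ∧ (pvLook d2 k).isSome) :
    pvAnyCmp d1 d2 cmp K =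
      some (K.any (fun k => cmp ((pvLook d1 k).getD 0) ((pvLook d2 k).getD 0))) := by
  induction K with
  | nil => simp [pvAnyCmp]
  | cons k rest ih =>
    obtain ⟨h1, h2⟩ := h k (by simp)
    obtain ⟨t1, ht1⟩ := Option.isSome_iff_exists.mp h1
    obtain ⟨t2, ht2⟩ := Option.isSome_iff_exists.mp h2
    have hrest := ih (fun x hx => h x (by simp [hx]))
    simp only [pvAnyCmp, ht1, ht2, List.any_cons, Option.getD_some]
    by_cases hc : cmp t1 t2 = true
    · simp [hc]
    · rw [Bool.not_eq_true] at hc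
      simp [hc, hrest]

-- under Pre_ (stated over a generic key list) the first scan never raises
lemma pvAnyCmp_ne_none (d1 d2 : List (String × List (String × Int))) (K : List String)
    (h : ∀ j : Nat, (hj : j < K.length) →
      ((K.take j).all (fun k => pvOk d1 d2 k && !pvGtAt d1 d2 k) = true) →
      pvOk d1 d2 K[j] = true) :
    pvAnyCmp d1 d2 (fun a b => b < a) K ≠ none := by
  induction K with
  | nil => simp [pvAnyCmp]
  | cons k rest ih =>
    have h0 : pvOk d1 d2 k = true := h 0 (by simp) (by simp)
    simp only [pvOk, Bool.and_eq_true] at h0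
    obtain ⟨t1, ht1⟩ := Option.isSome_iff_exists.mp h0.1
    obtain ⟨t2, ht2⟩ := Option.isSome_iff_exists.mp h0.2
    simp only [pvAnyCmp, ht1, ht2]
    by_cases hgt : t2 < t1
    · simp [hgt]
    · simp only [decide_eq_true_eq, hgt, if_false]
      apply ih
      intro j hj hall
      have hGt : pvGtAt d1 d2 k = false := by
        simp [pvGtAt, ht1, ht2, hgt]
      have := h (j + 1) (by simpa using Nat.succ_lt_succ hj)
        (by
          simp only [List.take_succ_cons, List.all_cons, Bool.and_eq_true]
          refine ⟨?_, hall⟩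
          simp [pvOk, ht1, ht2, hGt])
      simpa using this

-- ===== VERDICT =====
theorem compare_bid_times_py_spec : Claim_equal_compare_bid_times_py := by
  intro d1 d2 sdo _ hpre
  unfold Pre_compare_bid_times_py at hpre
  unfold Spec_compare_bid_times_py compare_bid_times_py compare_bid_times_py_alt
  rw [pvALoop_eq_pvAK, pvAK_main]
  cases hscan : pvAnyCmp d1 d2 (fun a b => b < a) ((d1.map Prod.fst).filter (pvBKeep sdo)) with
  | none => exact absurd hscan (pvAnyCmp_ne_none d1 d2 _ hpre)
  | some b =>
    cases b with
    | true => simp [hscan]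
    | false =>
      have hok := pvAnyCmp_false_allOk d1 d2 _ _ hscan
      have hlt := pvAnyCmp_spec d1 d2 (fun a b => a < b) _ hok
      simp only [hscan, hlt]
      cases hany : ((d1.map Prod.fst).filter (pvBKeep sdo)).any
          (fun k => decide ((pvLook d1 k).getD 0 < (pvLook d2 k).getD 0)) <;>
        simp
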